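-- pv_equiv track=rewrite | github.com/cezary-rosinski/PBL-converter | SPUB_additional_functions.py | parse_mrk
-- ===== SOURCE A (Python) =====
-- def parse_mrk(mrk):
--     records = []
--     record_dict = {}
--     for line in mrk.split('\n'):
--         if line.startswith('=LDR'):
--             if record_dict:
--                 records.append(record_dict)
--                 record_dict = {}
--             record_dict[line[1:4]] = [line[6:]]
--         elif line.startswith('='):
--             key = line[1:4]
--             if key in record_dict:
--                 record_dict[key] += [line[6:]]
--             else:
--                 record_dict[key] = [line[6:]]
--     records.append(record_dict)
--     return records
-- ===== SOURCE B (Python) =====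
-- def parse_mrk(mrk):
--     # Pass 1: partition the '=' lines into record blocks (new block at each '=LDR').
--     blocks = []
--     for line in mrk.split('\n'):
--         if not line.startswith('='):
--             continue
--         if line.startswith('=LDR') or not blocks:
--             blocks.append([line])
--         else:
--             blocks[-1].append(line)
--     # Pass 2: build one dict per block.
--     def build(block):
--         d = {}
--         for line in block:
--             d.setdefault(line[1:4], []).append(line[6:])
--         return d
--     return [build(b) for b in blocks] or [{}]
-- ===== Notes on version B (the rewrite author's own statement) =====
-- stated objective: alternative
-- what changed: A builds the records in a single pass with a running dict accumulator flushed at each leader line; B first partitions the field lines into per-record blocks and then builds one dict per block in a second pass.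
import Mathlib
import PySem

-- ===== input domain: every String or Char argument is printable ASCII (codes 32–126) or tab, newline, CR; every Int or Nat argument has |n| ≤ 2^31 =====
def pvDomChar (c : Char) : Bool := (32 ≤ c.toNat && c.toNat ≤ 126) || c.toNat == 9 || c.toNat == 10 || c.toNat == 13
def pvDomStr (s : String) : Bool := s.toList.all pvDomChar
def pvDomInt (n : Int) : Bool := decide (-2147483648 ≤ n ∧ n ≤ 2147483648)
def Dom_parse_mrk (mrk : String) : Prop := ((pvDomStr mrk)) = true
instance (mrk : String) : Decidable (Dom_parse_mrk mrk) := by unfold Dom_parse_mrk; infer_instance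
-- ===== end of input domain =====

-- B replaces A's running-accumulator single pass by two passes (partition lines into
-- record blocks, then build one dict per block); objective: alternative decomposition.


-- mrk.split('\n'), used by both ports: sep "\n" ≠ "" so split? is always some; getD unwraps (exact)
def pvLines (mrk : String) : List String := (PySem.Str.split? mrk "\n").getD []

-- ===== PORT A =====

-- the body of A's for-loop, state = (records, record_dict)
def pvStepA (st : List (PySem.Dict String (List String)) × PySem.Dict String (List String))
    (line : String) :
    List (PySem.Dict String (List String)) × PySem.Dict String (List String) :=
  let records := st.1
  let d := st.2
  if PySem.Str.startswith line "=LDR" then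
    let records' := if d.items ≠ [] then records ++ [d] else records
    let d' : PySem.Dict String (List String) := if d.items ≠ [] then PySem.Dict.empty else d
    (records', d'.insert (PySem.Str.slice line (some 1) (some 4))
        [PySem.Str.slice line (some 6) none])
  else if PySem.Str.startswith line "=" then
    let key := PySem.Str.slice line (some 1) (some 4)
    if d.contains key then
      (records, d.insert key (d.getD key [] ++ [PySem.Str.slice line (some 6) none]))
    else
      (records, d.insert key [PySem.Str.slice line (some 6) none])
  else (records, d)

def parse_mrk (mrk : String) : List (List (String × List String)) :=
  let st := (pvLines mrk).foldl pvStepA ([], PySem.Dict.empty)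
  (st.1 ++ [st.2]).map (fun d => d.items)

-- ===== PORT B =====
-- pass 1 loop body: partition '=' lines into blocks, new block at each '=LDR'
def pvStepB (blocks : List (List String)) (line : String) : List (List String) :=
  if ¬ PySem.Str.startswith line "=" then blocks
  else if PySem.Str.startswith line "=LDR" ∨ blocks = [] then blocks ++ [[line]]
  else blocks.dropLast ++ [blocks.getLastD [] ++ [line]]   -- blocks[-1].append(line)

-- pass 2: d.setdefault(line[1:4], []).append(line[6:]) is Dict.modify key [] (· ++ [v])
def pvBuild (block : List String) : PySem.Dict String (List String) :=
  block.foldl (fun d line =>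
    d.modify (PySem.Str.slice line (some 1) (some 4)) []
      (· ++ [PySem.Str.slice line (some 6) none])) PySem.Dict.empty

def parse_mrk_alt (mrk : String) : List (List (String × List String)) :=
  let blocks := (pvLines mrk).foldl pvStepB []
  let res := blocks.map (fun b => (pvBuild b).items)
  if res = [] then [[]] else res      -- `or [{}]`

-- ===== PRECONDITION & SPEC =====
def Spec_parse_mrk (mrk : String) (out : List (List (String × List String))) : Prop := out = parse_mrk_alt mrk
instance (mrk : String) (out : List (List (String × List String))) : Decidable (Spec_parse_mrk mrk out) := by unfold Spec_parse_mrk; infer_instance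

-- ===== CLAIM (what is proved, stated in full; the proofs are below) =====
def Claim_equal_parse_mrk : Prop := ∀ (mrk : String), Dom_parse_mrk mrk → Spec_parse_mrk mrk (parse_mrk mrk)

-- ===== LEMMAS AND PROOFS =====

-- a line starting with "=LDR" starts with "="
theorem pv_sw_eq_of_ldr {line : String}
    (h : PySem.Str.startswith line "=LDR" = true) :
    PySem.Str.startswith line "=" = true := by
  simp only [PySem.Str.startswith_eq, PySem.Chars.startswith, List.isPrefixOf_iff_prefix] at h ⊢
  exact List.IsPrefix.trans (by decide) h

-- inserting never empties a dict
theorem pv_items_insert_ne_nil (d : PySem.Dict String (List String)) (k : String)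
    (v : List String) : (d.insert k v).items ≠ [] := by
  rw [PySem.Dict.items_insert]
  split_ifs with hc
  · intro h
    rw [PySem.Dict.contains_iff_mem_keys] at hc
    simp only [PySem.Dict.keys] at hc
    rcases List.mem_map.mp hc with ⟨p, hp, _⟩
    simp [List.map_eq_nil_iff.mp h] at hp
  · simp

-- what A's loop body does on a non-LDR '=' line: exactly B's builder step
theorem pvStepA_mid (recs : List (PySem.Dict String (List String)))
    (d : PySem.Dict String (List String)) (line : String)
    (h1 : PySem.Str.startswith line "=" = true)
    (h2 : PySem.Str.startswith line "=LDR" = false) :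
    pvStepA (recs, d) line =
      (recs, d.modify (PySem.Str.slice line (some 1) (some 4)) []
        (· ++ [PySem.Str.slice line (some 6) none])) := by
  simp only [pvStepA, h1, h2, Bool.false_eq_true, if_false, if_true]
  split_ifs with hc
  · simp [PySem.Dict.modify]
  · have hg : d.getD (PySem.Str.slice line (some 1) (some 4)) [] = [] :=
      PySem.Dict.getD_of_not_contains d [] (by simpa using hc)
    simp [PySem.Dict.modify, hg]

-- what A's loop body does on an '=LDR' line
theorem pvStepA_ldr (recs : List (PySem.Dict String (List String)))
    (d : PySem.Dict String (List String)) (line : String)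
    (h : PySem.Str.startswith line "=LDR" = true) :
    pvStepA (recs, d) line =
      ((if d.items ≠ [] then recs ++ [d] else recs),
        PySem.Dict.empty.insert (PySem.Str.slice line (some 1) (some 4))
          [PySem.Str.slice line (some 6) none]) := by
  simp only [pvStepA, h, if_true]
  by_cases hd : d.items = []
  · have : d = PySem.Dict.empty := PySem.Dict.ext (by simpa using hd)
    simp [this]
  · simp [hd]

-- a non-'=' line leaves A's state unchanged
theorem pvStepA_skip (recs : List (PySem.Dict String (List String)))
    (d : PySem.Dict String (List String)) (line : String)
    (h : PySem.Str.startswith line "=" = false) :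
    pvStepA (recs, d) line = (recs, d) := by
  have hldr : PySem.Str.startswith line "=LDR" = false := by
    by_contra hc
    rw [pv_sw_eq_of_ldr (by simpa using hc)] at h
    exact absurd h (by simp)
  simp [pvStepA, -PySem.Str.startswith_eq, h, hldr]

theorem pv_build_single (line : String) :
    pvBuild [line] =
      PySem.Dict.empty.insert (PySem.Str.slice line (some 1) (some 4))
        [PySem.Str.slice line (some 6) none] := by
  simp [pvBuild, PySem.Dict.modify, PySem.Dict.getD_empty]

theorem pv_build_concat (b : List String) (line : String) :
    pvBuild (b ++ [line]) =
      (pvBuild b).modify (PySem.Str.slice line (some 1) (some 4)) []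
        (· ++ [PySem.Str.slice line (some 6) none]) := by
  simp [pvBuild, List.foldl_append]

-- the relation the two folds maintain
def pvInv (st : List (PySem.Dict String (List String)) × PySem.Dict String (List String))
    (blocks : List (List String)) : Prop :=
  (blocks = [] ∧ st.1 = [] ∧ st.2 = PySem.Dict.empty) ∨
  (blocks ≠ [] ∧ st.1 = blocks.dropLast.map pvBuild ∧
    st.2 = pvBuild (blocks.getLastD []) ∧ st.2.items ≠ [])

theorem pv_getLastD_eq_getLast {α : Type} (l : List α) (a : α) (h : l ≠ []) :
    l.getLastD a = l.getLast h := by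
  simp [List.getLastD_eq_getLast?, List.getLast?_eq_some_getLast h]

theorem pv_map_eq_dropLast_concat (blocks : List (List String)) (h : blocks ≠ []) :
    blocks.map pvBuild = blocks.dropLast.map pvBuild ++ [pvBuild (blocks.getLastD [])] := by
  conv_lhs => rw [← List.dropLast_append_getLast h]
  rw [List.map_append, pv_getLastD_eq_getLast blocks [] h]
  simp

theorem pv_step_inv (st : List (PySem.Dict String (List String)) × PySem.Dict String (List String))
    (blocks : List (List String)) (line : String) (h : pvInv st blocks) :
    pvInv (pvStepA st line) (pvStepB blocks line) := by
  obtain ⟨recs, d⟩ := st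
  by_cases heq : PySem.Str.startswith line "=" = true
  · by_cases hldr : PySem.Str.startswith line "=LDR" = true
    · -- '=LDR': a new block starts
      rw [pvStepA_ldr recs d line hldr]
      have hB : pvStepB blocks line = blocks ++ [[line]] := by
        simp [pvStepB, -PySem.Str.startswith_eq, heq, hldr]
      rw [hB]
      rcases h with ⟨hb, hr, hd⟩ | ⟨hb, hr, hd, hne⟩
      · simp only at hr hd
        refine Or.inr ⟨by simp, ?_, ?_, pv_items_insert_ne_nil _ _ _⟩
        · have : d.items = [] := by rw [hd]; rfl
          simp [this, hb, hr]
        · simp only [List.getLastD_concat, pv_build_single]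
      · simp only at hr hd hne
        refine Or.inr ⟨by simp, ?_, ?_, pv_items_insert_ne_nil _ _ _⟩
        · rw [if_pos hne, List.dropLast_concat, hr, hd, ← pv_map_eq_dropLast_concat blocks hb]
        · simp only [List.getLastD_concat, pv_build_single]
    · -- other '=' line: appended to the current block
      have hldrF : PySem.Str.startswith line "=LDR" = false := by simpa using hldr
      rw [pvStepA_mid recs d line heq hldrF]
      rcases h with ⟨hb, hr, hd⟩ | ⟨hb, hr, hd, hne⟩
      · simp only at hr hd
        have hB : pvStepB blocks line = [[line]] := by
          simp [pvStepB, -PySem.Str.startswith_eq, heq, hb]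
        rw [hB]
        refine Or.inr ⟨by simp, by simp [hr], ?_, ?_⟩
        · have : d.modify (PySem.Str.slice line (some 1) (some 4)) []
              (· ++ [PySem.Str.slice line (some 6) none]) =
              pvBuild ([] ++ [line]) := by
            rw [pv_build_concat, hd]; rfl
          simpa using this
        · rw [hd]
          simp only [PySem.Dict.modify]
          exact pv_items_insert_ne_nil _ _ _
      · simp only at hr hd hne
        have hB : pvStepB blocks line = blocks.dropLast ++ [blocks.getLastD [] ++ [line]] := by
          simp [pvStepB, -PySem.Str.startswith_eq, heq, hldrF, hb]
        rw [hB]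
        refine Or.inr ⟨by simp, ?_, ?_, ?_⟩
        · rw [List.dropLast_concat, hr]
        · rw [List.getLastD_concat, pv_build_concat, hd]
        · simp only [PySem.Dict.modify]
          exact pv_items_insert_ne_nil _ _ _
  · -- not an '=' line: both loops skip it
    have heqF : PySem.Str.startswith line "=" = false := by simpa using heq
    rw [pvStepA_skip recs d line heqF]
    have hB : pvStepB blocks line = blocks := by simp [pvStepB, -PySem.Str.startswith_eq, heqF]
    rw [hB]
    exact h

theorem pv_fold_inv (lines : List String)
    (st : List (PySem.Dict String (List String)) × PySem.Dict String (List String))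
    (blocks : List (List String)) (h : pvInv st blocks) :
    pvInv (lines.foldl pvStepA st) (lines.foldl pvStepB blocks) := by
  induction lines generalizing st blocks with
  | nil => exact h
  | cons l ls ih => exact ih _ _ (pv_step_inv st blocks l h)

-- ===== VERDICT (by name: the statement is the Claim_ definition above) =====
theorem parse_mrk_spec : Claim_equal_parse_mrk := by
  intro mrk _
  unfold Spec_parse_mrk parse_mrk parse_mrk_alt
  have h := pv_fold_inv (pvLines mrk) ([], PySem.Dict.empty) [] (Or.inl ⟨rfl, rfl, rfl⟩)
  set st := (pvLines mrk).foldl pvStepA ([], PySem.Dict.empty) with hst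
  set blocks := (pvLines mrk).foldl pvStepB [] with hbl
  rcases h with ⟨hb, hr, hd⟩ | ⟨hb, hr, hd, _⟩
  · have : PySem.Dict.empty.items = ([] : List (String × List String)) := rfl
    simp [hb, hr, hd, this]
  · have hres : blocks.map (fun b => (pvBuild b).items) ≠ [] := by
      simpa using hb
    simp only [if_neg hres]
    rw [hr, hd, ← pv_map_eq_dropLast_concat blocks hb, List.map_map]
    rfl
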